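-- pv_equiv track=rewrite | github.com/TahirAlauddin/Mac-PLists-Automation | main.py | count_items_in_entity
-- ===== SOURCE A (Python) =====
-- def count_items_in_entity(entity: list):
--     """Counts the items in an entity"""
--     count_a = count_b = 0
--
--     for item in entity:
--         if item["a"] != "<no entry>":
--             count_a += 1
--         else:
--             count_b += 1
--     return count_a, count_b
-- ===== SOURCE B (Python) =====
-- def count_items_in_entity(entity: list):
--     """Counts the items in an entity"""
--     n = len(entity)
--     if n == 0:
--         return 0, 0
--     if n == 1:
--         if entity[0]["a"] != "<no entry>":
--             return 1, 0
--         return 0, 1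
--     mid = n // 2
--     a1, b1 = count_items_in_entity(entity[:mid])
--     a2, b2 = count_items_in_entity(entity[mid:])
--     return a1 + a2, b1 + b2
-- ===== Notes on version B (the rewrite author's own statement) =====
-- stated objective: alternative
-- what changed: B counts by divide-and-conquer: it splits the list in half, recursively counts each half and adds the two count pairs, instead of A's single left-to-right loop with two branching accumulators; correct because both counts are additive over concatenation.
import Mathlib
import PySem

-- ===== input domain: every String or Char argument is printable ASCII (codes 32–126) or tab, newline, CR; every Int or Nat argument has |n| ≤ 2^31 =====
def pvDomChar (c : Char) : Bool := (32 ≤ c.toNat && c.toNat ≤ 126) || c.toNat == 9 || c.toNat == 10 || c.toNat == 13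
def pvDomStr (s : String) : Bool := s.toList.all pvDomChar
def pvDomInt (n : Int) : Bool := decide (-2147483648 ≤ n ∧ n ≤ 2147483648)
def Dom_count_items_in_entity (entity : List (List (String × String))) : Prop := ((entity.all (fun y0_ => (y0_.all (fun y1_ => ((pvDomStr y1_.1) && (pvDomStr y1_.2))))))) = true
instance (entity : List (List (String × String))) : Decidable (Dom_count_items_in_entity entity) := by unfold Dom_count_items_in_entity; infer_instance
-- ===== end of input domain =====

-- B counts by divide-and-conquer (split in half, recurse, add the pairs) instead of A's single branching loop (objective: alternative).


-- ===== PORT A =====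
-- loop body of A: branch on item["a"], bump one of the two counters
-- (item["a"] raises KeyError when the key is missing: the none case is excluded by Pre_)
def stepA (s : Int × Int) (item : List (String × String)) : Int × Int :=
  match List.lookup "a" item with
  | some v => if v ≠ "<no entry>" then (s.1 + 1, s.2) else (s.1, s.2 + 1)
  | none => s

def count_items_in_entity (entity : List (List (String × String))) : Int × Int :=
  entity.foldl stepA (0, 0)

-- ===== PORT B =====
-- divide and conquer: entity[:mid] / entity[mid:] with 0 ≤ mid ≤ n are exactly take/drop;
-- in the n = 1 base case the missing-key KeyError (excluded by Pre_) is ported as the none branch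
def count_items_in_entity_alt (entity : List (List (String × String))) : Int × Int :=
  if entity.length = 0 then (0, 0)
  else if entity.length = 1 then
    match entity with
    | item :: _ =>
      match List.lookup "a" item with
      | some v => if v ≠ "<no entry>" then (1, 0) else (0, 1)
      | none => (0, 0)
    | [] => (0, 0)
  else
    let mid := entity.length / 2
    let p1 := count_items_in_entity_alt (entity.take mid)
    let p2 := count_items_in_entity_alt (entity.drop mid)
    (p1.1 + p2.1, p1.2 + p2.2)
termination_by entity.length
decreasing_by
  · simp only [List.length_take]; omega
  · simp only [List.length_drop]; omega

-- ===== PRECONDITION & SPEC =====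
-- Pre_ excludes exactly the inputs on which item["a"] raises KeyError (an item without an "a" key); B raises there too.
def Pre_count_items_in_entity (entity : List (List (String × String))) : Prop :=
  ∀ item ∈ entity, (List.lookup "a" item).isSome = true
instance (entity : List (List (String × String))) : Decidable (Pre_count_items_in_entity entity) := by unfold Pre_count_items_in_entity; infer_instance
def pvWitness_count_items_in_entity : (List (List (String × String))) := [[("a", "x")], [("a", "<no entry>")]]
def Spec_count_items_in_entity (entity : List (List (String × String))) (out : Int × Int) : Prop := out = count_items_in_entity_alt entity
instance (entity : List (List (String × String))) (out : Int × Int) : Decidable (Spec_count_items_in_entity entity out) := by unfold Spec_count_items_in_entity; infer_instance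

-- ===== CLAIM (what is proved, stated in full; the proofs are below) =====
def Claim_equal_count_items_in_entity : Prop := ∀ (entity : List (List (String × String))), Dom_count_items_in_entity entity → Pre_count_items_in_entity entity → Spec_count_items_in_entity entity (count_items_in_entity entity)

-- ===== LEMMAS AND PROOFS =====

-- stepA adds a per-item delta independent of the accumulator
theorem foldl_stepA_shift (l : List (List (String × String))) (s : Int × Int) :
    l.foldl stepA s = (s.1 + (l.foldl stepA (0, 0)).1, s.2 + (l.foldl stepA (0, 0)).2) := by
  induction l generalizing s with
  | nil => simp
  | cons x xs ih =>
    rw [List.foldl_cons, List.foldl_cons]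
    rcases h : List.lookup "a" x with _ | v
    · have e : ∀ t : Int × Int, stepA t x = t := fun t => by unfold stepA; rw [h]
      conv_lhs => rw [ih]
      conv_rhs => rw [ih]
      rw [e s, e (0, 0)]
      simp
    · have e : ∀ t : Int × Int, stepA t x
          = if v ≠ "<no entry>" then (t.1 + 1, t.2) else (t.1, t.2 + 1) := fun t => by
        unfold stepA; rw [h]
      conv_lhs => rw [ih]
      conv_rhs => rw [ih]
      rw [e s, e (0, 0)]
      split_ifs <;> (refine Prod.ext ?_ ?_ <;> simp) <;> ring

-- A's fold is additive over concatenation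
theorem foldl_stepA_append (l₁ l₂ : List (List (String × String))) :
    (l₁ ++ l₂).foldl stepA (0, 0)
      = ((l₁.foldl stepA (0, 0)).1 + (l₂.foldl stepA (0, 0)).1,
         (l₁.foldl stepA (0, 0)).2 + (l₂.foldl stepA (0, 0)).2) := by
  rw [List.foldl_append, foldl_stepA_shift l₂ (l₁.foldl stepA (0, 0))]

-- B's divide-and-conquer computes A's fold (strong induction on length)
theorem alt_eq_fold (n : Nat) :
    ∀ l : List (List (String × String)), l.length ≤ n →
      Pre_count_items_in_entity l → count_items_in_entity_alt l = l.foldl stepA (0, 0) := by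
  induction n with
  | zero =>
    intro l hl _
    have : l = [] := List.eq_nil_of_length_eq_zero (Nat.le_zero.mp hl)
    subst this
    rw [count_items_in_entity_alt.eq_def]
    simp
  | succ n ih =>
    intro l hl hp
    rw [count_items_in_entity_alt.eq_def]
    by_cases h0 : l.length = 0
    · rw [if_pos h0]
      rw [List.eq_nil_of_length_eq_zero h0]
      simp
    · rw [if_neg h0]
      by_cases h1 : l.length = 1
      · rw [if_pos h1]
        match l, h1 with
        | [item], _ =>
          have hx := hp item (by simp)
          rcases h : List.lookup "a" item with _ | v
          · simp [h] at hx
          · simp only [List.foldl_cons, List.foldl_nil]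
            simp [stepA, h]
      · rw [if_neg h1]
        have h2 : 2 ≤ l.length := by omega
        have hmidlt : l.length / 2 < l.length := by omega
        have hmidpos : 1 ≤ l.length / 2 := by omega
        have hpre : ∀ l' : List (List (String × String)), l'.Sublist l →
            Pre_count_items_in_entity l' := fun l' hs i hi => hp i (hs.mem hi)
        have ht := ih (l.take (l.length / 2))
          (by simp [List.length_take]; omega) (hpre _ (List.take_sublist _ _))
        have hd := ih (l.drop (l.length / 2))
          (by simp [List.length_drop]; omega) (hpre _ (List.drop_sublist _ _))
        simp only [ht, hd]
        have := foldl_stepA_append (l.take (l.length / 2)) (l.drop (l.length / 2))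
        rw [List.take_append_drop] at this
        rw [this]

-- ===== VERDICT (by name: the statement is the Claim_ definition above) =====
theorem count_items_in_entity_spec : Claim_equal_count_items_in_entity := by
  intro entity _ hp
  unfold Spec_count_items_in_entity count_items_in_entity
  rw [alt_eq_fold entity.length entity (le_refl _) hp]
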